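-- pv_equiv track=rewrite | github.com/cthorrez/riix | riix/sort.py | mergesort_and_dedup
-- ===== SOURCE A (Python) =====
-- def mergesort_and_dedup(a):
--     if len(a) == 1:
--         return [(a[0],1)]
--     if len(a) == 2:
--         if a[0] < a[1]:
--             return [(a[0],1), (a[1],1)]
--         elif a[1] < a[0]:
--             return [(a[1],1), (a[0],1)]
--         else:
--             return [(a[0],2)]
--
--     midx = len(a) // 2
--     left, right = a[:midx], a[midx:]
--
--     left_sorted = mergesort_and_dedup(left)
--     right_sorted = mergesort_and_dedup(right)
--
--     out_list = []
--     li, ri = 0, 0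
--     while li + ri < len(left_sorted) + len(right_sorted):
--         if li == len(left_sorted):
--             out_list.append(right_sorted[ri])
--             ri += 1
--         elif ri == len(right_sorted):
--             out_list.append(left_sorted[li])
--             li += 1
--         elif left_sorted[li][0] < right_sorted[ri][0]:
--             out_list.append(left_sorted[li])
--             li += 1
--         elif left_sorted[li][0] > right_sorted[ri][0]:
--             out_list.append(right_sorted[ri])
--             ri += 1
--         else:
--             out_list.append((left_sorted[li][0], left_sorted[li][1] + right_sorted[ri][1]))
--             li += 1
--             ri += 1
--
--     return out_list
-- ===== SOURCE B (Python) =====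
-- def mergesort_and_dedup(a):
--     # sort once, then one linear pass grouping equal runs
--     out = []
--     for x in sorted(a):
--         if out and out[-1][0] == x:
--             out[-1] = (x, out[-1][1] + 1)
--         else:
--             out.append((x, 1))
--     return out
-- ===== Notes on version B (the rewrite author's own statement) =====
-- stated objective: simpler
-- what changed: B replaces A's recursive divide-and-conquer merge-with-dedup by a single sorted() call followed by one linear grouping pass that counts equal runs.
import Mathlib
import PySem

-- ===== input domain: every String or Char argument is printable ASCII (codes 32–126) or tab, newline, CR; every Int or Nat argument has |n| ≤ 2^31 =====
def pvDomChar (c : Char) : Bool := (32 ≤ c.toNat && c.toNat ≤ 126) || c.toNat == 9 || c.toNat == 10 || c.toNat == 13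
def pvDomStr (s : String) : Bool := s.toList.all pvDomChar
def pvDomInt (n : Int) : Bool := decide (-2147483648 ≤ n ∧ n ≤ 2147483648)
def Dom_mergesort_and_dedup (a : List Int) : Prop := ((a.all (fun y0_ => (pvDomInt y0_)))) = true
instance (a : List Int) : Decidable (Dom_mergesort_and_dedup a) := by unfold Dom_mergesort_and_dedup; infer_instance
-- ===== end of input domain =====

-- B replaces A's recursive merge-and-dedup by one sort followed by a recursive grouping pass (objective: simpler).


-- ===== PORT A =====
-- A's merge-and-dedup while loop, as recursion over the two run lists
-- (same comparisons in the same order: li exhausted, ri exhausted, <, >, else combine)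
def pvMergeA : List (Int × Int) → List (Int × Int) → List (Int × Int)
  | [], rs => rs
  | l :: ls, [] => l :: pvMergeA ls []
  | (lv, lc) :: ls, (rv, rc) :: rs =>
    if lv < rv then (lv, lc) :: pvMergeA ls ((rv, rc) :: rs)
    else if rv < lv then (rv, rc) :: pvMergeA ((lv, lc) :: ls) rs
    else (lv, lc + rc) :: pvMergeA ls rs
termination_by L R => L.length + R.length

-- a[:midx] / a[midx:] with 0 ≤ midx ≤ len(a) are exactly take/drop.
-- Python A never returns on a = [] (unbounded recursion → RecursionError); outside Pre_, the port gives [].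
def mergesort_and_dedup (a : List Int) : List (Int × Int) :=
  match a with
  | [] => []
  | [x] => [(x, 1)]
  | [x, y] =>
    if x < y then [(x, 1), (y, 1)]
    else if y < x then [(y, 1), (x, 1)]
    else [(x, 2)]
  | x :: y :: z :: t =>
    let a' := x :: y :: z :: t
    let midx := a'.length / 2
    pvMergeA (mergesort_and_dedup (a'.take midx)) (mergesort_and_dedup (a'.drop midx))
termination_by a.length
decreasing_by
  · simp; omega
  · simp; omega

-- ===== PORT B =====
-- Source B's loop body: 'if out and out[-1][0] == x: out[-1] = (x, out[-1][1] + 1) else: out.append((x, 1))'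
def pvStep (out : List (Int × Int)) (x : Int) : List (Int × Int) :=
  match out.getLast? with
  | some (y, c) => if y = x then out.dropLast ++ [(x, c + 1)] else out ++ [(x, 1)]
  | none => out ++ [(x, 1)]

def mergesort_and_dedup_alt (a : List Int) : List (Int × Int) :=
  (PySem.List.sorted a (fun v => v) false).foldl pvStep []

-- ===== PRECONDITION & SPEC =====
-- Pre_ excludes exactly the empty list: there Python A recurses forever (RecursionError) and returns no value.
def Pre_mergesort_and_dedup (a : List Int) : Prop := a ≠ []
instance (a : List Int) : Decidable (Pre_mergesort_and_dedup a) := by unfold Pre_mergesort_and_dedup; infer_instance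
def pvWitness_mergesort_and_dedup : List Int := [3, 1, 3, 2]


def Spec_mergesort_and_dedup (a : List Int) (out : List (Int × Int)) : Prop := out = mergesort_and_dedup_alt a
instance (a : List Int) (out : List (Int × Int)) : Decidable (Spec_mergesort_and_dedup a out) := by unfold Spec_mergesort_and_dedup; infer_instance

-- ===== CLAIM (what is proved, stated in full; the proofs are below) =====
def Claim_equal_mergesort_and_dedup : Prop := ∀ (a : List Int), Dom_mergesort_and_dedup a → Pre_mergesort_and_dedup a → Spec_mergesort_and_dedup a (mergesort_and_dedup a)

-- ===== LEMMAS AND PROOFS =====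

-- total multiplicity a run list assigns to a value
def pvCnt (L : List (Int × Int)) (v : Int) : Int :=
  ((L.filter (fun p => p.1 = v)).map (fun p => p.2)).sum

-- a well-formed run list: strictly increasing keys, positive counts
def pvWF (L : List (Int × Int)) : Prop :=
  L.Pairwise (fun p q => p.1 < q.1) ∧ ∀ p ∈ L, 0 < p.2

lemma pvCnt_nil (v : Int) : pvCnt [] v = 0 := rfl

lemma pvCnt_cons (p : Int × Int) (L : List (Int × Int)) (v : Int) :
    pvCnt (p :: L) v = (if p.1 = v then p.2 else 0) + pvCnt L v := by
  simp only [pvCnt, List.filter_cons]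
  split_ifs with h <;> simp_all

lemma pvCnt_eq_zero_of_lt (L : List (Int × Int)) (v : Int)
    (h : ∀ p ∈ L, v < p.1) : pvCnt L v = 0 := by
  induction L with
  | nil => rfl
  | cons p t ih =>
    rw [pvCnt_cons]
    have hp := h p (by simp)
    rw [if_neg (by omega), ih (fun q hq => h q (by simp [hq]))]
    ring

-- extensionality: well-formed run lists with the same count function are equal
lemma pvWF_ext (L R : List (Int × Int)) (hL : pvWF L) (hR : pvWF R)
    (h : ∀ v, pvCnt L v = pvCnt R v) : L = R := by
  induction L generalizing R with
  | nil =>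
    cases R with
    | nil => rfl
    | cons q t =>
      exfalso
      have h0 := h q.1
      rw [pvCnt_nil, pvCnt_cons, if_pos rfl,
        pvCnt_eq_zero_of_lt t q.1 (fun p hp => (List.pairwise_cons.1 hR.1).1 p hp)] at h0
      have := hR.2 q (by simp)
      omega
  | cons p s ih =>
    cases R with
    | nil =>
      exfalso
      have h0 := h p.1
      rw [pvCnt_nil, pvCnt_cons, if_pos rfl,
        pvCnt_eq_zero_of_lt s p.1 (fun q hq => (List.pairwise_cons.1 hL.1).1 q hq)] at h0
      have := hL.2 p (by simp)
      omega
    | cons q t =>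
      have hps : pvCnt s p.1 = 0 :=
        pvCnt_eq_zero_of_lt s p.1 (fun r hr => (List.pairwise_cons.1 hL.1).1 r hr)
      have hqt : pvCnt t q.1 = 0 :=
        pvCnt_eq_zero_of_lt t q.1 (fun r hr => (List.pairwise_cons.1 hR.1).1 r hr)
      have hpc := hL.2 p (by simp)
      have hqc := hR.2 q (by simp)
      have hkey : p.1 = q.1 := by
        by_contra hne
        rcases lt_or_gt_of_ne hne with hlt | hgt
        · have h0 := h p.1
          rw [pvCnt_cons, pvCnt_cons, if_pos rfl, if_neg (by omega), hps,
            pvCnt_eq_zero_of_lt t p.1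
              (fun r hr => lt_trans hlt ((List.pairwise_cons.1 hR.1).1 r hr))] at h0
          omega
        · have h0 := h q.1
          rw [pvCnt_cons, pvCnt_cons, if_neg (by omega), if_pos rfl,
            pvCnt_eq_zero_of_lt s q.1
              (fun r hr => lt_trans hgt ((List.pairwise_cons.1 hL.1).1 r hr)), hqt] at h0
          omega
      have hcnt : p.2 = q.2 := by
        have h0 := h p.1
        rw [pvCnt_cons, pvCnt_cons, if_pos rfl, if_pos hkey.symm, hps, hkey, hqt] at h0
        omega
      have htl : s = t := by
        refine ih t ⟨(List.pairwise_cons.1 hL.1).2, fun r hr => hL.2 r (List.mem_cons_of_mem _ hr)⟩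
          ⟨(List.pairwise_cons.1 hR.1).2, fun r hr => hR.2 r (List.mem_cons_of_mem _ hr)⟩ ?_
        intro v
        by_cases hv : v = p.1
        · rw [hv, hps, hkey, hqt]
        · have h0 := h v
          rw [pvCnt_cons, pvCnt_cons, if_neg (by omega), if_neg (by rw [← hkey]; omega)] at h0
          omega
      rw [Prod.ext_iff.2 ⟨hkey, hcnt⟩, htl]

lemma pvMergeA_nil_right (ls : List (Int × Int)) : pvMergeA ls [] = ls := by
  induction ls with
  | nil => simp [pvMergeA]
  | cons l t ih => rw [pvMergeA, ih]

-- every key of pvMergeA comes from one of the inputs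
lemma pvMergeA_keys (L R : List (Int × Int)) (p : Int × Int)
    (hp : p ∈ pvMergeA L R) : (∃ q ∈ L, p.1 = q.1) ∨ (∃ q ∈ R, p.1 = q.1) := by
  induction L generalizing R with
  | nil => simp only [pvMergeA] at hp; exact Or.inr ⟨p, hp, rfl⟩
  | cons l ls ihl =>
    induction R with
    | nil =>
      rw [pvMergeA_nil_right] at hp
      exact Or.inl ⟨p, hp, rfl⟩
    | cons r rs ihr =>
      obtain ⟨lv, lc⟩ := l; obtain ⟨rv, rc⟩ := r
      rw [pvMergeA] at hp
      split_ifs at hp with h1 h2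
      · rcases List.mem_cons.1 hp with h | h
        · exact Or.inl ⟨(lv, lc), by simp, by rw [h]⟩
        · rcases ihl _ h with ⟨q, hq, he⟩ | hr
          · exact Or.inl ⟨q, by simp [hq], he⟩
          · exact Or.inr hr
      · rcases List.mem_cons.1 hp with h | h
        · exact Or.inr ⟨(rv, rc), by simp, by rw [h]⟩
        · rcases ihr h with hl | ⟨q, hq, he⟩
          · exact Or.inl hl
          · exact Or.inr ⟨q, by simp [hq], he⟩
      · rcases List.mem_cons.1 hp with h | h
        · exact Or.inl ⟨(lv, lc), by simp, by rw [h]⟩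
        · rcases ihl _ h with ⟨q, hq, he⟩ | ⟨q, hq, he⟩
          · exact Or.inl ⟨q, by simp [hq], he⟩
          · exact Or.inr ⟨q, by simp [hq], he⟩

-- merging preserves well-formedness and adds multiplicities
lemma pvMergeA_spec (L R : List (Int × Int)) (hL : pvWF L) (hR : pvWF R) :
    pvWF (pvMergeA L R) ∧ ∀ v, pvCnt (pvMergeA L R) v = pvCnt L v + pvCnt R v := by
  induction L generalizing R with
  | nil => simp only [pvMergeA]; exact ⟨hR, fun v => by rw [pvCnt_nil]; ring⟩
  | cons l ls ihl =>
    induction R with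
    | nil =>
      rw [pvMergeA_nil_right]
      exact ⟨hL, fun v => by rw [pvCnt_nil]; ring⟩
    | cons r rs ihr =>
      obtain ⟨lv, lc⟩ := l; obtain ⟨rv, rc⟩ := r
      have hLt : pvWF ls := ⟨(List.pairwise_cons.1 hL.1).2, fun p hp => hL.2 p (by simp [hp])⟩
      have hRt : pvWF rs := ⟨(List.pairwise_cons.1 hR.1).2, fun p hp => hR.2 p (by simp [hp])⟩
      rw [pvMergeA]
      split_ifs with h1 h2
      · obtain ⟨hwf, hc⟩ := ihl ((rv, rc) :: rs) hLt hR
        refine ⟨⟨List.pairwise_cons.2 ⟨?_, hwf.1⟩, ?_⟩, ?_⟩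
        · intro p hp
          rcases pvMergeA_keys _ _ p hp with ⟨q, hq, he⟩ | ⟨q, hq, he⟩
          · rw [he]; exact (List.pairwise_cons.1 hL.1).1 q hq
          · rcases List.mem_cons.1 hq with h | h
            · rw [he, h]; exact h1
            · rw [he]; exact lt_trans h1 ((List.pairwise_cons.1 hR.1).1 q h)
        · intro p hp
          rcases List.mem_cons.1 hp with h | h
          · rw [h]; exact hL.2 (lv, lc) (by simp)
          · exact hwf.2 p h
        · intro v; rw [pvCnt_cons, hc v, pvCnt_cons (L := ls)]; ring
      · obtain ⟨hwf, hc⟩ := ihr hRt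
        refine ⟨⟨List.pairwise_cons.2 ⟨?_, hwf.1⟩, ?_⟩, ?_⟩
        · intro p hp
          rcases pvMergeA_keys _ _ p hp with ⟨q, hq, he⟩ | ⟨q, hq, he⟩
          · rcases List.mem_cons.1 hq with h | h
            · rw [he, h]; exact h2
            · rw [he]; exact lt_trans h2 ((List.pairwise_cons.1 hL.1).1 q h)
          · rw [he]; exact (List.pairwise_cons.1 hR.1).1 q hq
        · intro p hp
          rcases List.mem_cons.1 hp with h | h
          · rw [h]; exact hR.2 (rv, rc) (by simp)
          · exact hwf.2 p h
        · intro v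
          rw [pvCnt_cons, hc v, pvCnt_cons (L := rs), pvCnt_cons (p := (lv, lc))]
          ring
      · have hk : lv = rv := by omega
        obtain ⟨hwf, hc⟩ := ihl rs hLt hRt
        refine ⟨⟨List.pairwise_cons.2 ⟨?_, hwf.1⟩, ?_⟩, ?_⟩
        · intro p hp
          rcases pvMergeA_keys _ _ p hp with ⟨q, hq, he⟩ | ⟨q, hq, he⟩
          · rw [he]; exact (List.pairwise_cons.1 hL.1).1 q hq
          · rw [he, hk]; exact (List.pairwise_cons.1 hR.1).1 q hq
        · intro p hp
          rcases List.mem_cons.1 hp with h | h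
          · have h3 := hL.2 (lv, lc) (by simp)
            have h4 := hR.2 (rv, rc) (by simp)
            rw [h]; simp at h3 h4 ⊢; omega
          · exact hwf.2 p h
        · intro v
          rw [pvCnt_cons, hc v, pvCnt_cons (L := ls), pvCnt_cons (L := rs)]
          simp only [hk]
          split_ifs <;> ring

lemma pvCnt_append (L R : List (Int × Int)) (v : Int) :
    pvCnt (L ++ R) v = pvCnt L v + pvCnt R v := by
  simp [pvCnt, List.filter_append]

lemma pvCnt_pair (x c : Int) (L : List (Int × Int)) (v : Int) :
    pvCnt ((x, c) :: L) v = (if x = v then c else 0) + pvCnt L v := by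
  rw [pvCnt_cons]

-- the fold invariant: from a well-formed accumulator whose keys are ≤ every remaining
-- (sorted) element, the fold stays well-formed and adds the remaining multiplicities
lemma pvFold_spec : ∀ (s : List Int) (out : List (Int × Int)),
    s.Pairwise (· ≤ ·) → pvWF out → (∀ p ∈ out, ∀ v ∈ s, p.1 ≤ v) →
    pvWF (s.foldl pvStep out) ∧
      ∀ v, pvCnt (s.foldl pvStep out) v = pvCnt out v + (s.count v : Int) := by
  intro s
  induction s with
  | nil => exact fun out _ hwf _ => ⟨hwf, fun v => by simp⟩
  | cons x xs ih =>
    intro out hs hwf hbd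
    have hxs : xs.Pairwise (· ≤ ·) := (List.pairwise_cons.1 hs).2
    have hxle : ∀ v ∈ xs, x ≤ v := (List.pairwise_cons.1 hs).1
    have hstep : pvWF (pvStep out x) ∧ (∀ p ∈ pvStep out x, ∀ v ∈ xs, p.1 ≤ v) ∧
        ∀ v, pvCnt (pvStep out x) v = pvCnt out v + (if x = v then 1 else 0) := by
      cases hlast : out.getLast? with
      | none =>
        have hout : out = [] := List.getLast?_eq_none_iff.1 hlast
        subst hout
        rw [show pvStep [] x = [(x, 1)] from rfl]
        refine ⟨⟨by simp, by simp⟩, ?_, fun v => ?_⟩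
        · intro p hp v hv
          simp at hp
          rw [hp]
          exact hxle v hv
        · rw [pvCnt_pair, pvCnt_nil]
          split_ifs <;> ring
      | some q =>
        obtain ⟨y, c⟩ := q
        obtain ⟨pre, hout⟩ := List.getLast?_eq_some_iff.1 hlast
        have hdl : out.dropLast = pre := by rw [hout, List.dropLast_concat]
        have hstep_eq : pvStep out x =
            if y = x then pre ++ [(x, c + 1)] else out ++ [(x, 1)] := by
          rw [pvStep, hlast, hdl]
        have hyx : y ≤ x := hbd (y, c) (by rw [hout]; simp) x (by simp)
        have hpw := hwf.1
        rw [hout, List.pairwise_append] at hpw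
        have hc0 : 0 < c := by
          have := hwf.2 (y, c) (by rw [hout]; simp)
          simpa using this
        by_cases hy : y = x
        · rw [hstep_eq, if_pos hy]
          refine ⟨⟨?_, ?_⟩, ?_, fun v => ?_⟩
          · rw [List.pairwise_append]
            refine ⟨hpw.1, by simp, fun p hp q hq => ?_⟩
            simp at hq
            rw [hq]
            show p.1 < x
            have := hpw.2.2 p hp (y, c) (by simp)
            simp at this
            omega
          · intro p hp
            rcases List.mem_append.1 hp with h | h
            · exact hwf.2 p (by rw [hout]; exact List.mem_append_left _ h)
            · simp at h; rw [h]; simp; omega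
          · intro p hp v hv
            rcases List.mem_append.1 hp with h | h
            · exact hbd p (by rw [hout]; exact List.mem_append_left _ h) v
                (List.mem_cons_of_mem _ hv)
            · simp at h; rw [h]; exact hxle v hv
          · rw [hout, pvCnt_append, pvCnt_append, pvCnt_pair, pvCnt_pair, pvCnt_nil, hy]
            split_ifs <;> ring
        · have hylt : y < x := lt_of_le_of_ne hyx hy
          rw [hstep_eq, if_neg hy]
          refine ⟨⟨?_, ?_⟩, ?_, fun v => ?_⟩
          · rw [List.pairwise_append]
            refine ⟨hwf.1, by simp, fun p hp q hq => ?_⟩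
            simp at hq
            rw [hq]
            show p.1 < x
            rw [hout] at hp
            rcases List.mem_append.1 hp with h | h
            · have := hpw.2.2 p h (y, c) (by simp)
              simp at this
              omega
            · simp at h; rw [h]; exact hylt
          · intro p hp
            rcases List.mem_append.1 hp with h | h
            · exact hwf.2 p h
            · simp at h; rw [h]; simp
          · intro p hp v hv
            rcases List.mem_append.1 hp with h | h
            · exact hbd p h v (List.mem_cons_of_mem _ hv)
            · simp at h; rw [h]; exact hxle v hv
          · rw [pvCnt_append, pvCnt_pair, pvCnt_nil]
            split_ifs <;> ring
    obtain ⟨hwf', hbd', hc'⟩ := hstep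
    obtain ⟨hwfF, hcF⟩ := ih (pvStep out x) hxs hwf' hbd'
    refine ⟨hwfF, fun v => ?_⟩
    show pvCnt (xs.foldl pvStep (pvStep out x)) v = _
    rw [hcF v, hc' v]
    simp only [List.count_cons, beq_iff_eq]
    by_cases hv : x = v
    · rw [if_pos hv, if_pos hv]; push_cast; ring
    · rw [if_neg hv, if_neg hv]; push_cast; ring

-- A's port is a well-formed run list counting the input's elements (fuel = a length bound)
lemma portA_spec_aux (n : Nat) : ∀ (a : List Int), a.length ≤ n → a ≠ [] →
    pvWF (mergesort_and_dedup a) ∧ ∀ v, pvCnt (mergesort_and_dedup a) v = (a.count v : Int) := by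
  induction n with
  | zero =>
    intro a ha h
    cases a with
    | nil => exact absurd rfl h
    | cons x t => simp at ha
  | succ n ih =>
    intro a ha h
    match a with
    | [x] =>
      refine ⟨⟨by simp [mergesort_and_dedup], by simp [mergesort_and_dedup]⟩, fun v => ?_⟩
      simp only [mergesort_and_dedup]
      rw [pvCnt_cons, pvCnt_nil]
      by_cases hv : x = v <;> simp [hv]
    | [x, y] =>
      simp only [mergesort_and_dedup]
      split_ifs with h1 h2
      · refine ⟨⟨by simp [h1], by simp⟩, fun v => ?_⟩
        rw [pvCnt_cons, pvCnt_cons, pvCnt_nil]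
        simp only [List.count_cons, List.count_nil]
        by_cases hx : x = v <;> by_cases hy : y = v <;>
          split_ifs <;> push_cast <;> simp_all <;> omega
      · refine ⟨⟨by simp [h2], by simp⟩, fun v => ?_⟩
        rw [pvCnt_cons, pvCnt_cons, pvCnt_nil]
        simp only [List.count_cons, List.count_nil]
        by_cases hx : x = v <;> by_cases hy : y = v <;>
          split_ifs <;> push_cast <;> simp_all <;> omega
      · have hxy : x = y := by omega
        subst hxy
        refine ⟨⟨by simp, by simp⟩, fun v => ?_⟩
        rw [pvCnt_cons, pvCnt_nil]
        simp only [List.count_cons, List.count_nil]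
        by_cases hx : x = v <;> split_ifs <;> push_cast <;> simp_all <;> omega
    | x :: y :: z :: t =>
      have hlen : (x :: y :: z :: t).length = t.length + 3 := by simp
      have hm1 : 1 ≤ (x :: y :: z :: t).length / 2 := by omega
      have hm2 : (x :: y :: z :: t).length / 2 < (x :: y :: z :: t).length := by omega
      have hTn : ((x :: y :: z :: t).take ((x :: y :: z :: t).length / 2)).length ≤ n := by
        rw [List.length_take]; simp at ha ⊢; omega
      have hDn : ((x :: y :: z :: t).drop ((x :: y :: z :: t).length / 2)).length ≤ n := by
        rw [List.length_drop]; simp at ha ⊢; omega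
      have hTne : (x :: y :: z :: t).take ((x :: y :: z :: t).length / 2) ≠ [] := by
        intro he
        have := congrArg List.length he
        rw [List.length_take] at this
        simp at this <;> omega
      have hDne : (x :: y :: z :: t).drop ((x :: y :: z :: t).length / 2) ≠ [] := by
        intro he
        have := congrArg List.length he
        rw [List.length_drop] at this
        simp at this <;> omega
      obtain ⟨hwfT, hcT⟩ := ih _ hTn hTne
      obtain ⟨hwfD, hcD⟩ := ih _ hDn hDne
      obtain ⟨hwfM, hcM⟩ := pvMergeA_spec _ _ hwfT hwfD
      rw [show mergesort_and_dedup (x :: y :: z :: t) =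
        pvMergeA (mergesort_and_dedup ((x :: y :: z :: t).take ((x :: y :: z :: t).length / 2)))
          (mergesort_and_dedup ((x :: y :: z :: t).drop ((x :: y :: z :: t).length / 2)))
        from by rw [mergesort_and_dedup]]
      refine ⟨hwfM, fun v => ?_⟩
      rw [hcM v, hcT v, hcD v]
      have hc : ((x :: y :: z :: t).take ((x :: y :: z :: t).length / 2)).count v +
            ((x :: y :: z :: t).drop ((x :: y :: z :: t).length / 2)).count v
          = ((x :: y :: z :: t).count v) := by
        rw [← List.count_append, List.take_append_drop]
      exact_mod_cast hc

lemma portA_spec (a : List Int) (h : a ≠ []) :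
    pvWF (mergesort_and_dedup a) ∧ ∀ v, pvCnt (mergesort_and_dedup a) v = (a.count v : Int) :=
  portA_spec_aux a.length a le_rfl h

-- ===== VERDICT (by name: the statement is the Claim_ definition above) =====
theorem mergesort_and_dedup_spec : Claim_equal_mergesort_and_dedup := by
  intro a _ ha
  unfold Spec_mergesort_and_dedup mergesort_and_dedup_alt
  obtain ⟨hwfA, hcntA⟩ := portA_spec a ha
  have hs : (PySem.List.sorted a (fun v => v) false).Pairwise (· ≤ ·) := by
    simpa using PySem.List.sorted_pairwise (xs := a) (key := fun v => v)
  obtain ⟨hwfB, hcntB⟩ := pvFold_spec _ [] hs ⟨List.Pairwise.nil, by simp⟩ (by simp)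
  apply pvWF_ext _ _ hwfA hwfB
  intro v
  rw [hcntA v, hcntB v, pvCnt_nil, zero_add,
    (PySem.List.sorted_perm (xs := a) (key := fun v => v) (rev := false)).count_eq v]
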